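-- pv_equiv track=rewrite | github.com/MattLoftus/quantum-gravity | experiments/exp89.py | find_maximal_chains
-- ===== SOURCE A (Python) =====
-- def hasse_diagram(rel, N):
--     """Compute the Hasse diagram (cover relations) from a relation matrix."""
--     cover = [[False]*N for _ in range(N)]
--     for i in range(N):
--         for j in range(N):
--             if rel[i][j]:
--                 is_cover = True
--                 for k in range(N):
--                     if k != i and k != j and rel[i][k] and rel[k][j]:
--                         is_cover = False
--                         break
--                 if is_cover:
--                     cover[i][j] = True
--     return cover
--
-- def find_maximal_chains(rel, N):
--     """Find all maximal chains via Hasse diagram DFS."""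
--     cover = hasse_diagram(rel, N)
--     has_pred = [any(rel[j][i] for j in range(N)) for i in range(N)]
--     has_succ = [any(rel[i][j] for j in range(N)) for i in range(N)]
--     minimals = [i for i in range(N) if not has_pred[i]]
--     chains = []
--
--     def dfs(chain):
--         last = chain[-1]
--         succs = [j for j in range(N) if cover[last][j]]
--         if not succs:
--             chains.append(tuple(chain))
--             return
--         for s in succs:
--             chain.append(s)
--             dfs(chain)
--             chain.pop()
--
--     for m in minimals:
--         dfs([m])
--     # Isolated elements
--     for i in range(N):
--         if not has_pred[i] and not has_succ[i]:
--             if (i,) not in chains: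
--                 chains.append((i,))
--     return chains
-- ===== SOURCE B (Python) =====
-- def hasse_diagram(rel, N):
--     """Compute the Hasse diagram (cover relations) from a relation matrix."""
--     cover = [[False]*N for _ in range(N)]
--     for i in range(N):
--         for j in range(N):
--             if rel[i][j]:
--                 is_cover = True
--                 for k in range(N):
--                     if k != i and k != j and rel[i][k] and rel[k][j]:
--                         is_cover = False
--                         break
--                 if is_cover:
--                     cover[i][j] = True
--     return cover
--
-- def find_maximal_chains(rel, N):
--     """Find all maximal chains: compose maximal suffix-paths bottom-up from each minimal element."""
--     cover = hasse_diagram(rel, N)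
--     has_pred = [any(rel[j][i] for j in range(N)) for i in range(N)]
--     minimals = [i for i in range(N) if not has_pred[i]]
--
--     def paths_from(v):
--         succs = [j for j in range(N) if cover[v][j]]
--         if not succs:
--             return [(v,)]
--         return [(v,) + t for s in succs for t in paths_from(s)]
--
--     return [p for m in minimals for p in paths_from(m)]
-- ===== Notes on version B (the rewrite author's own statement) =====
-- stated objective: simpler
-- what changed: Replaces the mutating prefix-accumulating DFS (shared chains list, chain.append/pop backtracking) by a pure recursion that composes maximal suffix chains bottom-up from each minimal element, and drops the has_succ computation and the isolated-elements pass, which are provably redundant.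
import Mathlib
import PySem

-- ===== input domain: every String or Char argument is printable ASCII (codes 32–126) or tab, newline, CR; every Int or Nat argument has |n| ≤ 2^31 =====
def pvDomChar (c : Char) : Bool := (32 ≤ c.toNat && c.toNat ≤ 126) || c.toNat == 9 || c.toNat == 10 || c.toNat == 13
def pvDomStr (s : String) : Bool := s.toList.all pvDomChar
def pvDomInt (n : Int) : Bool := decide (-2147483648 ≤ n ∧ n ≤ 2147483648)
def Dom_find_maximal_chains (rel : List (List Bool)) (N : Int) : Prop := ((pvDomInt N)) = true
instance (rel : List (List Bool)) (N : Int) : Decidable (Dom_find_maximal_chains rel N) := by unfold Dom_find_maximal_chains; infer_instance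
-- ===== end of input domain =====

-- B replaces A's mutating, prefix-accumulating DFS by a pure recursion composing maximal suffix
-- chains bottom-up, and drops the provably redundant isolated-element pass (objective: simpler).

-- ===== PORT A =====
-- rel[i][j]; indices are in range on every input Pre_ admits (out of range Python raises IndexError)
def pvRel (rel : List (List Bool)) (i j : Nat) : Bool := ((rel.getD i []).getD j false)

-- hasse_diagram, pointwise: cover[i][j] is set exactly when rel[i][j] holds and the inner k-loop
-- (a linear scan with break) finds no intermediate k — ported as the corresponding List.any test
def pvCover (rel : List (List Bool)) (n : Nat) (i j : Nat) : Bool :=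
  pvRel rel i j &&
    !((List.range n).any fun k => (decide (k ≠ i)) && (decide (k ≠ j)) && pvRel rel i k && pvRel rel k j)

def pvHasPred (rel : List (List Bool)) (n : Nat) (i : Nat) : Bool :=
  (List.range n).any (fun j => pvRel rel j i)

def pvHasSucc (rel : List (List Bool)) (n : Nat) (i : Nat) : Bool :=
  (List.range n).any (fun j => pvRel rel i j)

def pvSuccs (rel : List (List Bool)) (n : Nat) (v : Nat) : List Nat :=
  (List.range n).filter (fun j => pvCover rel n v j)

-- A's dfs: chain is the mutable prefix, acc the global chains list; fuel only makes the
-- recursion total (it is never exhausted on inputs where the Python terminates, i.e. on Pre_)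
def pvDfsA (rel : List (List Bool)) (n : Nat) : Nat → List Nat → List (List Int) → List (List Int)
  | 0, _, acc => acc
  | f+1, chain, acc =>
    let succs := pvSuccs rel n (chain.getLast?.getD 0)
    if succs.isEmpty then acc ++ [chain.map Int.ofNat]
    else succs.foldl (fun a s => pvDfsA rel n f (chain ++ [s]) a) acc

def find_maximal_chains (rel : List (List Bool)) (N : Int) : List (List Int) :=
  let n := N.toNat
  let minimals := (List.range n).filter (fun i => !pvHasPred rel n i)
  let chains := minimals.foldl (fun a m => pvDfsA rel n (n+1) [m] a) []
  (List.range n).foldl (fun a i =>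
    if !pvHasPred rel n i && !pvHasSucc rel n i && !(a.contains [Int.ofNat i]) then
      a ++ [[Int.ofNat i]]
    else a) chains

-- ===== PORT B =====
-- B's paths_from: the list of maximal suffix chains starting at v (fuel = totality guard only)
def pvPathsB (rel : List (List Bool)) (n : Nat) : Nat → Nat → List (List Int)
  | 0, _ => []
  | f+1, v =>
    let succs := pvSuccs rel n v
    if succs.isEmpty then [[Int.ofNat v]]
    else succs.flatMap (fun s => (pvPathsB rel n f s).map (fun t => Int.ofNat v :: t))

def find_maximal_chains_alt (rel : List (List Bool)) (N : Int) : List (List Int) :=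
  let n := N.toNat
  let minimals := (List.range n).filter (fun i => !pvHasPred rel n i)
  minimals.flatMap (fun m => pvPathsB rel n (n+1) m)

-- ===== PRECONDITION & SPEC =====
-- forward closure in the cover graph: n rounds of one-step extension starting from S
def pvFwd (rel : List (List Bool)) (n : Nat) (S : List Nat) : List Nat :=
  Nat.iterate
    (fun S => (List.range n).filter (fun j => S.contains j || S.any (fun i => pvCover rel n i j)))
    n S

-- Exactly the inputs on which the Python A returns normally: all indices below N are in range
-- (otherwise IndexError), and no cover-relation cycle is reachable from a minimal element
-- (otherwise the DFS recurses forever and Python raises RecursionError).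
def Pre_find_maximal_chains (rel : List (List Bool)) (N : Int) : Prop :=
  N ≤ (rel.length : Int) ∧
  (∀ row ∈ rel.take N.toNat, N ≤ (row.length : Int)) ∧
  (∀ v ∈ pvFwd rel N.toNat
      ((List.range N.toNat).filter (fun i => !pvHasPred rel N.toNat i)),
    (pvFwd rel N.toNat (pvSuccs rel N.toNat v)).contains v = false)

instance (rel : List (List Bool)) (N : Int) : Decidable (Pre_find_maximal_chains rel N) := by
  unfold Pre_find_maximal_chains; infer_instance

def pvWitness_find_maximal_chains : List (List Bool) × Int :=
  ([[false, true], [false, false]], 2)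

def Spec_find_maximal_chains (rel : List (List Bool)) (N : Int) (out : List (List Int)) : Prop := out = find_maximal_chains_alt rel N
instance (rel : List (List Bool)) (N : Int) (out : List (List Int)) : Decidable (Spec_find_maximal_chains rel N out) := by unfold Spec_find_maximal_chains; infer_instance

-- ===== CLAIM (what is proved, stated in full; the proofs are below) =====
def Claim_equal_find_maximal_chains : Prop := ∀ (rel : List (List Bool)) (N : Int), Dom_find_maximal_chains rel N → Pre_find_maximal_chains rel N → Spec_find_maximal_chains rel N (find_maximal_chains rel N)

-- ===== LEMMAS AND PROOFS =====

-- A's dfs from a nonempty prefix produces exactly B's suffix chains, each glued behind the prefix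
theorem pvDfsA_eq_pathsB (rel : List (List Bool)) (n : Nat) :
    ∀ (f : Nat) (chain : List Nat) (acc : List (List Int)), chain ≠ [] →
      pvDfsA rel n f chain acc =
        acc ++ (pvPathsB rel n f (chain.getLast?.getD 0)).map
          (fun p => chain.dropLast.map Int.ofNat ++ p) := by
  intro f
  induction f with
  | zero => intro chain acc _; simp [pvDfsA, pvPathsB]
  | succ f ih =>
    intro chain acc hne
    rw [pvDfsA, pvPathsB]
    by_cases hs : (pvSuccs rel n (chain.getLast?.getD 0)).isEmpty
    · rw [if_pos hs, if_pos hs, List.getLast?_eq_some_getLast hne]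
      have h2 : chain.dropLast ++ [chain.getLast hne] = chain :=
        List.dropLast_append_getLast hne
      simp only [Option.getD_some]
      conv_lhs => rw [← h2]
      simp [List.map_append]
    · rw [if_neg hs, if_neg hs]
      have hcong : (pvSuccs rel n (chain.getLast?.getD 0)).foldl
            (fun a s => pvDfsA rel n f (chain ++ [s]) a) acc
          = (pvSuccs rel n (chain.getLast?.getD 0)).foldl
            (fun a s => a ++ (pvPathsB rel n f s).map
              (fun t => chain.map Int.ofNat ++ t)) acc := by
        apply PySem.List.foldl_congr_mem
        intro a s _
        rw [ih (chain ++ [s]) a (by simp)]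
        simp
      rw [hcong, PySem.List.foldl_append_eq_flatMap]
      congr 1
      rw [List.map_flatMap]
      apply List.flatMap_congr  -- pointwise equality of the two per-successor lists
      intro s _
      rw [List.map_map]
      apply List.map_congr_left
      intro t _
      have h1 : chain.getLast? = some (chain.getLast hne) := List.getLast?_eq_some_getLast hne
      have h2 : chain.dropLast ++ [chain.getLast hne] = chain := List.dropLast_append_getLast hne
      simp only [Function.comp]
      rw [h1]
      simp only [Option.getD_some]
      conv_lhs => rw [← h2]
      simp [List.map_append]

-- an isolated element already occurs in the flatMap of suffix chains over the minimals
theorem iso_mem (rel : List (List Bool)) (n : Nat) (i : Nat) (hi : i < n)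
    (hp : pvHasPred rel n i = false) (hsucc : pvHasSucc rel n i = false) :
    [Int.ofNat i] ∈ ((List.range n).filter (fun m => !pvHasPred rel n m)).flatMap
      (fun m => pvPathsB rel n (n+1) m) := by
  have hmem : i ∈ (List.range n).filter (fun m => !pvHasPred rel n m) := by
    simp [List.mem_filter, List.mem_range, hi, hp]
  have hempty : pvSuccs rel n i = [] := by
    unfold pvSuccs
    apply List.filter_eq_nil_iff.mpr
    intro j hj
    have : pvRel rel i j = false := by
      by_contra hc
      have : pvHasSucc rel n i = true := by
        unfold pvHasSucc
        exact List.any_eq_true.mpr ⟨j, hj, by simpa using hc⟩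
      simp [this] at hsucc
    simp [pvCover, this]
  rw [List.mem_flatMap]
  refine ⟨i, hmem, ?_⟩
  rw [pvPathsB, hempty]
  simp

-- the isolated-elements pass of A never appends anything: every candidate is already present
theorem iso_fold_noop (rel : List (List Bool)) (n : Nat) :
    ∀ (l : List Nat) (a : List (List Int)),
      (∀ i ∈ l, pvHasPred rel n i = false → pvHasSucc rel n i = false → [Int.ofNat i] ∈ a) →
      l.foldl (fun a i =>
        if !pvHasPred rel n i && !pvHasSucc rel n i && !(a.contains [Int.ofNat i]) then
          a ++ [[Int.ofNat i]]
        else a) a = a := by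
  intro l
  induction l with
  | nil => intro a _; rfl
  | cons x xs ih =>
    intro a h
    have hx : (if !pvHasPred rel n x && !pvHasSucc rel n x && !(a.contains [Int.ofNat x]) then
        a ++ [[Int.ofNat x]] else a) = a := by
      by_cases hp : pvHasPred rel n x = false
      · by_cases hq : pvHasSucc rel n x = false
        · have hmem : [Int.ofNat x] ∈ a := h x (by simp) hp hq
          have : a.contains [Int.ofNat x] = true := List.contains_iff_mem.mpr hmem
          simp [hp, hq]
          exact hmem
        · simp [eq_true_of_ne_false hq]
      · simp [eq_true_of_ne_false hp]
    simp only [List.foldl_cons, hx]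
    exact ih a (fun i hi => h i (by simp [hi]))

-- ===== VERDICT (by name: the statement is the Claim_ definition above) =====
theorem find_maximal_chains_spec : Claim_equal_find_maximal_chains := by
  intro rel N _ _
  unfold Spec_find_maximal_chains find_maximal_chains find_maximal_chains_alt
  simp only []
  set n := N.toNat with hn
  set minimals := (List.range n).filter (fun i => !pvHasPred rel n i) with hmins
  have hchains : minimals.foldl (fun a m => pvDfsA rel n (n+1) [m] a) []
      = minimals.flatMap (fun m => pvPathsB rel n (n+1) m) := by
    have hcong : minimals.foldl (fun a m => pvDfsA rel n (n+1) [m] a) []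
        = minimals.foldl (fun a m => a ++ pvPathsB rel n (n+1) m) [] := by
      apply PySem.List.foldl_congr_mem
      intro a m _
      rw [pvDfsA_eq_pathsB rel n (n+1) [m] a (by simp)]
      simp
    rw [hcong, PySem.List.foldl_append_eq_flatMap]
    simp
  rw [hchains]
  apply iso_fold_noop
  intro i hi hp hq
  exact iso_mem rel n i (List.mem_range.mp hi) hp hq
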